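-- pv_equiv track=rewrite | github.com/NgoDinhHuan/Learn-python | chapter4.py | kiem_tra
-- ===== SOURCE A (Python) =====
-- def kiem_tra(chuoi):
--     if len(chuoi) % 2 !=0:
--         return "ko doi xung"
--     else:
--         d = ""
--         c = ""
--         t = len(chuoi)//2
--         for i in range(0,t):
--             d = d + chuoi[i]
--         for i in range(t, len(chuoi)):
--             c = c + chuoi[i]
--         x = d[::-1]
--         if(x == c):
--             return "doi xung"
--         else:
--             return"ko doi xung"
-- ===== SOURCE B (Python) =====
-- def kiem_tra(chuoi):
--     if len(chuoi) % 2 != 0: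
--         return "ko doi xung"
--     lo = 0
--     hi = len(chuoi) - 1
--     while lo < hi:
--         if chuoi[lo] != chuoi[hi]:
--             return "ko doi xung"
--         lo += 1
--         hi -= 1
--     return "doi xung"
-- ===== Notes on version B (the rewrite author's own statement) =====
-- stated objective: simpler
-- what changed: Replaces the two string-building loops plus slice-reverse-and-compare with an in-place two-pointer scan (lo/hi walking inward, early exit on first mismatch) that allocates nothing.
import Mathlib
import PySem

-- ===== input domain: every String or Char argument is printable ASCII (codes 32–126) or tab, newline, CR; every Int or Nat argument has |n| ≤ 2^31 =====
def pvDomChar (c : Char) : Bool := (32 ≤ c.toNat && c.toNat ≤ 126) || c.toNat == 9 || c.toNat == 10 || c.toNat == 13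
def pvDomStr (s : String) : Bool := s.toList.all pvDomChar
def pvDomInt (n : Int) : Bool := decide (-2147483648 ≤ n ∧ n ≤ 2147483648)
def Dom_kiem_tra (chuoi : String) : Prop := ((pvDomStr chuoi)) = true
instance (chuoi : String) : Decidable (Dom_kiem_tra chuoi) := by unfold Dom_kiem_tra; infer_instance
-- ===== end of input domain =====

-- B replaces A's two string-building loops + slice-reverse-compare with a two-pointer
-- inward scan with early exit (simpler, no intermediate strings). Return value only; no mutation.

-- ===== PORT A =====
-- literal port: build d = first half, c = second half by indexed loops, reverse d with [::-1], compare
def kiem_tra (chuoi : String) : String :=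
  let s := chuoi.toList
  if PySem.Int.mod (s.length : Int) 2 ≠ 0 then "ko doi xung"
  else
    let t : Int := PySem.Int.floordiv (s.length : Int) 2
    -- chuoi[i] is always in range in both loops, so pyGetD is exact (the default is never used)
    let d : List Char := (PySem.List.pyRange 0 t 1).foldl (fun d i => d ++ [PySem.List.pyGetD s i ' ']) []
    let c : List Char := (PySem.List.pyRange t (s.length : Int) 1).foldl (fun c i => c ++ [PySem.List.pyGetD s i ' ']) []
    let x := (PySem.List.slice? d none none (-1)).getD []   -- d[::-1]
    if x == c then "doi xung" else "ko doi xung"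

-- ===== PORT B =====
-- the while-loop of Source B; lo and hi stay ≥ 0 throughout, so Nat indices are exact
def kiemTraLoop (s : List Char) (lo hi : Nat) : Bool :=
  if lo < hi then
    if s.getD lo ' ' ≠ s.getD hi ' ' then false
    else kiemTraLoop s (lo + 1) (hi - 1)
  else true
termination_by hi - lo

def kiem_tra_alt (chuoi : String) : String :=
  let s := chuoi.toList
  if s.length % 2 ≠ 0 then "ko doi xung"
  else if kiemTraLoop s 0 (s.length - 1) then "doi xung" else "ko doi xung"

-- ===== PRECONDITION & SPEC =====
def Spec_kiem_tra (chuoi : String) (out : String) : Prop := out = kiem_tra_alt chuoi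
instance (chuoi : String) (out : String) : Decidable (Spec_kiem_tra chuoi out) := by unfold Spec_kiem_tra; infer_instance

-- ===== CLAIM (what is proved, stated in full; the proofs are below) =====
def Claim_equal_kiem_tra : Prop := ∀ (chuoi : String), Dom_kiem_tra chuoi → Spec_kiem_tra chuoi (kiem_tra chuoi)

-- ===== LEMMAS AND PROOFS =====

-- the two-pointer loop checks the pairing k ↦ lo + hi - k on the whole segment [lo, hi]
theorem kiemTraLoop_iff (s : List Char) (lo hi : Nat) :
    kiemTraLoop s lo hi = true ↔
      ∀ k, lo ≤ k → k ≤ hi → s.getD k ' ' = s.getD (lo + hi - k) ' ' := by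
  generalize hn : hi - lo = n
  induction n using Nat.strong_induction_on generalizing lo hi with
  | _ n ih =>
    rw [kiemTraLoop]
    by_cases hlt : lo < hi
    · by_cases hne : s.getD lo ' ' = s.getD hi ' '
      · rw [if_pos hlt, if_neg (by simpa using hne)]
        rw [ih ((hi - 1) - (lo + 1)) (by omega) (lo + 1) (hi - 1) rfl]
        constructor
        · intro h k hk1 hk2
          rcases eq_or_lt_of_le hk1 with rfl | hk1'
          · have e : lo + hi - lo = hi := by omega
            rw [e]; exact hne
          · rcases eq_or_lt_of_le hk2 with rfl | hk2'
            · have e : lo + k - k = lo := by omega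
              rw [e]; exact hne.symm
            · have := h k (by omega) (by omega)
              have e : lo + 1 + (hi - 1) - k = lo + hi - k := by omega
              rwa [e] at this
        · intro h k hk1 hk2
          have := h k (by omega) (by omega)
          have e : lo + 1 + (hi - 1) - k = lo + hi - k := by omega
          rw [e]; exact this
      · rw [if_pos hlt, if_pos (by simpa using hne)]
        constructor
        · intro h; exact absurd h (by simp)
        · intro h
          have := h lo le_rfl (le_of_lt hlt)
          have e : lo + hi - lo = hi := by omega
          rw [e] at this
          exact absurd this hne
    · rw [if_neg hlt]
      constructor
      · intro _ k hk1 hk2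
        have e : lo + hi - k = k := by omega
        rw [e]
      · intro _; rfl

-- the full two-pointer run decides the palindrome condition
theorem kiemTraLoop_pal (s : List Char) :
    kiemTraLoop s 0 (s.length - 1) = true ↔
      ∀ k, k < s.length → s.getD k ' ' = s.getD (s.length - 1 - k) ' ' := by
  rw [kiemTraLoop_iff]
  rcases Nat.eq_zero_or_pos s.length with h0 | hpos
  · constructor
    · intro _ k hk; omega
    · intro _ k _ hk
      have e : (0 : Nat) + (s.length - 1) - k = k := by omega
      rw [e]
  · constructor
    · intro h k hk
      have := h k (by omega) (by omega)
      have e : 0 + (s.length - 1) - k = s.length - 1 - k := by omega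
      rwa [e] at this
    · intro h k _ hk
      have e : 0 + (s.length - 1) - k = s.length - 1 - k := by omega
      rw [e]
      exact h k (by omega)

-- reversed first half = second half  ↔  palindrome condition (even length)
theorem take_rev_drop_iff (s : List Char) (t : Nat) (ht : s.length = 2 * t) :
    (s.take t).reverse = s.drop t ↔
      ∀ k, k < s.length → s.getD k ' ' = s.getD (s.length - 1 - k) ' ' := by
  have hlen1 : (s.take t).reverse.length = t := by simp; omega
  -- getD version ↔ getElem? version
  have hgq : (∀ k, k < s.length → s.getD k ' ' = s.getD (s.length - 1 - k) ' ') ↔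
      (∀ k, k < s.length → s[k]? = s[s.length - 1 - k]?) := by
    constructor
    · intro h k hk
      rw [List.getElem?_eq_getElem hk, List.getElem?_eq_getElem (by omega)]
      have := h k hk
      rw [List.getD_eq_getElem s ' ' hk, List.getD_eq_getElem s ' ' (show s.length - 1 - k < s.length by omega)] at this
      exact congrArg some this
    · intro h k hk
      rw [List.getD_eq_getElem?_getD, List.getD_eq_getElem?_getD, h k hk]
  rw [hgq]
  constructor
  · -- from the list equality, extract s[t-1-j]? = s[t+j]? for j < t, then re-index
    intro h
    have F : ∀ j, j < t → s[t - 1 - j]? = s[t + j]? := by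
      intro j hj
      have h1 : (s.take t).reverse[j]? = (s.drop t)[j]? := by rw [h]
      rw [List.getElem?_reverse (by simp; omega)] at h1
      rw [List.getElem?_take, List.getElem?_drop] at h1
      have e1 : (s.take t).length - 1 - j = t - 1 - j := by simp; omega
      rw [e1, if_pos (by omega)] at h1
      exact h1
    intro k hk
    by_cases hkt : k < t
    · have := F (t - 1 - k) (by omega)
      have e1 : t - 1 - (t - 1 - k) = k := by omega
      have e2 : t + (t - 1 - k) = s.length - 1 - k := by omega
      rwa [e1, e2] at this
    · have := F (k - t) (by omega)
      have e1 : t - 1 - (k - t) = s.length - 1 - k := by omega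
      have e2 : t + (k - t) = k := by omega
      rw [e1, e2] at this
      exact this.symm
  · intro h
    apply List.ext_getElem?
    intro j
    by_cases hjt : j < t
    · rw [List.getElem?_reverse (by simp; omega), List.getElem?_take, List.getElem?_drop]
      have e1 : (s.take t).length - 1 - j = t - 1 - j := by simp; omega
      rw [e1, if_pos (by omega)]
      have := h (t + j) (by omega)
      have e2 : s.length - 1 - (t + j) = t - 1 - j := by omega
      rw [e2] at this
      exact this.symm
    · rw [List.getElem?_eq_none (by simp; omega), List.getElem?_drop,
        List.getElem?_eq_none (by omega)]

-- A's first loop builds s.take t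
theorem mapRange_take (s : List Char) (t : Nat) (ht : t ≤ s.length) :
    (PySem.List.pyRange 0 (t : Int) 1).map (fun i => PySem.List.pyGetD s i ' ') = s.take t := by
  induction t with
  | zero => simp [PySem.List.pyRange_one_eq_nil]
  | succ m ih =>
    have hr : (PySem.List.pyRange 0 ((m : Int) + 1) 1) = PySem.List.pyRange 0 (m : Int) 1 ++ [(m : Int)] :=
      PySem.List.pyRange_one_succ_right (by positivity)
    push_cast
    have hg : PySem.List.pyGetD s ((m : Nat) : Int) ' ' = s[m]'(by omega) :=
      PySem.List.pyGetD_ofNat s m ' ' (by omega)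
    rw [hr, List.map_append, ih (by omega), List.map_singleton, hg,
      List.take_add_one, List.getElem?_eq_getElem (show m < s.length by omega)]
    rfl

-- ===== VERDICT (by name: the statement is the Claim_ definition above) =====
theorem kiem_tra_spec : Claim_equal_kiem_tra := by
  intro chuoi _
  unfold Spec_kiem_tra
  have hmod : PySem.Int.mod ((chuoi.toList.length : Nat) : Int) 2 = ((chuoi.toList.length % 2 : Nat) : Int) := by
    simp [PySem.Int.mod, Int.fmod_eq_emod]
  have hdiv : PySem.Int.floordiv ((chuoi.toList.length : Nat) : Int) 2 = ((chuoi.toList.length / 2 : Nat) : Int) := by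
    simp [PySem.Int.floordiv, Int.fdiv_eq_ediv]
  by_cases hpar : chuoi.toList.length % 2 = 0
  · -- even length: both sides decide the palindrome condition
    have hB : kiem_tra_alt chuoi =
        (if kiemTraLoop chuoi.toList 0 (chuoi.toList.length - 1) then "doi xung" else "ko doi xung") := by
      simp only [kiem_tra_alt]
      rw [if_neg (by omega)]
    have hA : kiem_tra chuoi =
        (if (chuoi.toList.take (chuoi.toList.length / 2)).reverse ==
            chuoi.toList.drop (chuoi.toList.length / 2) then "doi xung" else "ko doi xung") := by
      simp only [kiem_tra]
      rw [hmod, hdiv, if_neg (by omega)]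
      rw [PySem.List.foldl_append_singleton_eq_map (fun i => PySem.List.pyGetD chuoi.toList i ' '),
        PySem.List.foldl_append_singleton_eq_map (fun i => PySem.List.pyGetD chuoi.toList i ' ')]
      rw [List.nil_append, List.nil_append]
      rw [mapRange_take chuoi.toList (chuoi.toList.length / 2) (by omega)]
      rw [PySem.List.map_pyGetD_pyRange' chuoi.toList ' '
        (a := ((chuoi.toList.length / 2 : Nat) : Int)) (by positivity)]
      rw [PySem.List.slice?_none_none_neg_one, Option.getD_some, Int.toNat_natCast]
    rw [hA, hB]
    by_cases hP : ∀ k, k < chuoi.toList.length →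
        chuoi.toList.getD k ' ' = chuoi.toList.getD (chuoi.toList.length - 1 - k) ' '
    · rw [if_pos (beq_iff_eq.mpr
        ((take_rev_drop_iff chuoi.toList (chuoi.toList.length / 2) (by omega)).mpr hP))]
      rw [if_pos ((kiemTraLoop_pal chuoi.toList).mpr hP)]
    · rw [if_neg (by
        intro hc
        exact hP ((take_rev_drop_iff chuoi.toList (chuoi.toList.length / 2) (by omega)).mp
          (beq_iff_eq.mp hc)))]
      rw [if_neg (by
        intro hc
        exact hP ((kiemTraLoop_pal chuoi.toList).mp hc))]
  · -- odd length: both return "ko doi xung" immediately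
    have hB : kiem_tra_alt chuoi = "ko doi xung" := by
      simp only [kiem_tra_alt]
      rw [if_pos (by omega)]
    have hA : kiem_tra chuoi = "ko doi xung" := by
      simp only [kiem_tra]
      rw [hmod, if_pos (by omega)]
    rw [hA, hB]
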